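-- pv_equiv track=rewrite | github.com/zecheop/monthly_zecheon | build_site_data.py | find_peak_bucket
-- ===== SOURCE A (Python) =====
-- def normalize_text(value, fallback: str = "") -> str:
--     text = str(value or "").strip()
--     return text or fallback
--
-- def find_peak_bucket(bucket_counts) -> tuple[str, int]:
--     best_key = ""
--     best_count = 0
--     for bucket_key, raw_count in dict(bucket_counts or {}).items():
--         count = int(raw_count or 0)
--         bucket_text = normalize_text(bucket_key)
--         if count <= 0 or not bucket_text:
--             continue
--         if count > best_count or (count == best_count and bucket_text < best_key):
--             best_key = bucket_text
--             best_count = count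
--     return best_key, best_count
-- ===== SOURCE B (Python) =====
-- def normalize_text(value, fallback: str = "") -> str:
--     text = str(value or "").strip()
--     return text or fallback
--
-- def find_peak_bucket(bucket_counts) -> tuple[str, int]:
--     pairs = []
--     for bucket_key, raw_count in dict(bucket_counts or {}).items():
--         count = int(raw_count or 0)
--         bucket_text = normalize_text(bucket_key)
--         if count > 0 and bucket_text:
--             pairs.append((bucket_text, count))
--     pairs = sorted(pairs, key=lambda p: (-p[1], p[0]))
--     return pairs[0] if pairs else ("", 0)
-- ===== Notes on version B (the rewrite author's own statement) =====
-- stated objective: alternative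
-- what changed: Replaces A's running-best scan with carried (best_key, best_count) state by a filter pass that collects all valid (text, count) pairs, a stable sort by (-count, text), and taking the first element (or ('', 0) if none).
import Mathlib
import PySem

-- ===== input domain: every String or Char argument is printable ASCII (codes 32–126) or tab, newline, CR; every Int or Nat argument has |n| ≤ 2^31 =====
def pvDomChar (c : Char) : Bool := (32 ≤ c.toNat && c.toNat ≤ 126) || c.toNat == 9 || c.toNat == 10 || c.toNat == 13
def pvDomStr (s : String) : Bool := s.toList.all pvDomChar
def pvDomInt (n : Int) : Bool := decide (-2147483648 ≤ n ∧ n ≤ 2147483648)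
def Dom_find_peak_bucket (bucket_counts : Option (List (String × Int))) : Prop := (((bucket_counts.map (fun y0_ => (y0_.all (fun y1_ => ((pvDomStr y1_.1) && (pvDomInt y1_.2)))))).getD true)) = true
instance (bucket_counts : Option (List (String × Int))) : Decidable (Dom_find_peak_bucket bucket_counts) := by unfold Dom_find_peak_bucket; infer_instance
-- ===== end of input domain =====

-- B replaces A's running-best scan by filter-then-stable-sort-then-head (objective: alternative, same result).

-- ===== PORT A =====
-- normalize_text(value, fallback): str(value or "").strip() or fallback
def normalize_text (value : String) (fallback : String) : String :=
  let text := PySem.Str.strip (if value = "" then "" else value)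
  if text = "" then fallback else text

def find_peak_bucket (bucket_counts : Option (List (String × Int))) : String × Int :=
  (PySem.Dict.ofList (bucket_counts.getD [])).items.foldl
    (fun st p =>
      let count : Int := if p.2 = 0 then 0 else p.2   -- int(raw_count or 0)
      let bucket_text := normalize_text p.1 ""
      if count ≤ 0 ∨ bucket_text = "" then st
      else if count > st.2 ∨ (count = st.2 ∧ bucket_text < st.1) then (bucket_text, count)
      else st)
    ("", 0)

-- ===== PORT B =====
def find_peak_bucket_alt (bucket_counts : Option (List (String × Int))) : String × Int :=
  let pairs := (PySem.Dict.ofList (bucket_counts.getD [])).items.foldl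
    (fun acc p =>
      let count : Int := if p.2 = 0 then 0 else p.2
      let bucket_text := normalize_text p.1 ""
      if count > 0 ∧ bucket_text ≠ "" then acc ++ [(bucket_text, count)] else acc)
    []
  let sortedPairs := PySem.List.sorted2 pairs (fun p => -p.2) (fun p => p.1)
  match sortedPairs with
  | [] => ("", 0)
  | p :: _ => p

-- ===== PRECONDITION & SPEC =====
def Spec_find_peak_bucket (bucket_counts : Option (List (String × Int))) (out : String × Int) : Prop := out = find_peak_bucket_alt bucket_counts
instance (bucket_counts : Option (List (String × Int))) (out : String × Int) : Decidable (Spec_find_peak_bucket bucket_counts out) := by unfold Spec_find_peak_bucket; infer_instance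

-- ===== CLAIM (what is proved, stated in full; the proofs are below) =====
def Claim_equal_find_peak_bucket : Prop := ∀ (bucket_counts : Option (List (String × Int))), Dom_find_peak_bucket bucket_counts → Spec_find_peak_bucket bucket_counts (find_peak_bucket bucket_counts)

-- ===== LEMMAS AND PROOFS =====

-- the strict "better than" comparator sorted2 uses for key (-count, text)
def pvBefore (q a : String × Int) : Bool :=
  decide ((-q.2 : Int) < -a.2) || (!decide ((-a.2 : Int) < -q.2) && decide (q.1 < a.1))

lemma pvBefore_iff (q a : String × Int) :
    pvBefore q a = true ↔ (q.2 > a.2 ∨ (q.2 = a.2 ∧ q.1 < a.1)) := by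
  simp only [pvBefore, Bool.or_eq_true, Bool.and_eq_true, Bool.not_eq_true',
    decide_eq_true_eq, decide_eq_false_iff_not, not_lt, neg_lt_neg_iff]
  constructor
  · rintro (h | ⟨h1, h2⟩)
    · exact Or.inl h
    · rcases lt_or_eq_of_le h1 with h | h
      · exact Or.inl h
      · exact Or.inr ⟨h.symm, h2⟩
  · rintro (h | ⟨h1, h2⟩)
    · exact Or.inl h
    · exact Or.inr ⟨le_of_eq h1.symm, h2⟩

-- the element 'pairs' keeps for one input pair, if any
def pvValid (p : String × Int) : Option (String × Int) :=
  let count : Int := if p.2 = 0 then 0 else p.2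
  let bucket_text := normalize_text p.1 ""
  if count > 0 ∧ bucket_text ≠ "" then some (bucket_text, count) else none

lemma pvValid_pos {x p : String × Int} (h : pvValid p = some x) : 0 < x.2 := by
  unfold pvValid at h
  by_cases hc : (if p.2 = 0 then (0:Int) else p.2) > 0 ∧ normalize_text p.1 "" ≠ ""
  · rw [if_pos hc] at h
    cases h
    exact hc.1
  · rw [if_neg hc] at h
    cases h

-- one step of B's filtering loop
lemma pvStepB (p : String × Int) (acc : List (String × Int)) :
    (let count : Int := if p.2 = 0 then 0 else p.2
     let bucket_text := normalize_text p.1 ""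
     if count > 0 ∧ bucket_text ≠ "" then acc ++ [(bucket_text, count)] else acc)
    = acc ++ (pvValid p).toList := by
  unfold pvValid
  by_cases hc : (if p.2 = 0 then (0:Int) else p.2) > 0 ∧ normalize_text p.1 "" ≠ ""
  · simp only [if_pos hc, Option.toList_some]
  · simp only [if_neg hc, Option.toList_none, List.append_nil]

-- one step of A's running-best loop
lemma pvStepA (p : String × Int) (st : String × Int) :
    (let count : Int := if p.2 = 0 then 0 else p.2
     let bucket_text := normalize_text p.1 ""
     if count ≤ 0 ∨ bucket_text = "" then st
     else if count > st.2 ∨ (count = st.2 ∧ bucket_text < st.1) then (bucket_text, count)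
     else st)
    = (match pvValid p with
       | none => st
       | some q => if pvBefore q st then q else st) := by
  unfold pvValid
  by_cases hc : (if p.2 = 0 then (0:Int) else p.2) > 0 ∧ normalize_text p.1 "" ≠ ""
  · simp only [if_pos hc]
    rw [if_neg (by
      rw [not_or]
      exact ⟨not_le.mpr hc.1, hc.2⟩)]
    by_cases hb : (if p.2 = 0 then (0:Int) else p.2) > st.2 ∨
        ((if p.2 = 0 then (0:Int) else p.2) = st.2 ∧ normalize_text p.1 "" < st.1)
    · rw [if_pos hb, if_pos ((pvBefore_iff _ st).mpr hb)]
    · rw [if_neg hb, if_neg (fun h => hb ((pvBefore_iff _ st).mp h))]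
  · simp only [if_neg hc]
    rw [if_pos (by
      rcases not_and_or.mp hc with h | h
      · exact Or.inl (not_lt.mp h)
      · exact Or.inr (not_not.mp h))]

-- B's filtering loop builds exactly the filterMap of pvValid
lemma pv_filt (L : List (String × Int)) (acc : List (String × Int)) :
    L.foldl
      (fun acc p =>
        let count : Int := if p.2 = 0 then 0 else p.2
        let bucket_text := normalize_text p.1 ""
        if count > 0 ∧ bucket_text ≠ "" then acc ++ [(bucket_text, count)] else acc)
      acc = acc ++ L.filterMap pvValid := by
  induction L generalizing acc with
  | nil => simp
  | cons p L ih =>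
    simp only [List.foldl_cons, List.filterMap_cons]
    rw [show (let count : Int := if p.2 = 0 then 0 else p.2
              let bucket_text := normalize_text p.1 ""
              if count > 0 ∧ bucket_text ≠ "" then acc ++ [(bucket_text, count)] else acc)
        = acc ++ (pvValid p).toList from pvStepB p acc, ih]
    cases pvValid p with
    | none => simp
    | some q => simp

-- A's running-best loop is the pvBefore-fold over the same filtered list
lemma pv_scan (L : List (String × Int)) (st : String × Int) :
    L.foldl
      (fun st p =>
        let count : Int := if p.2 = 0 then 0 else p.2
        let bucket_text := normalize_text p.1 ""
        if count ≤ 0 ∨ bucket_text = "" then st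
        else if count > st.2 ∨ (count = st.2 ∧ bucket_text < st.1) then (bucket_text, count)
        else st)
      st
    = (L.filterMap pvValid).foldl (fun st q => if pvBefore q st then q else st) st := by
  induction L generalizing st with
  | nil => simp
  | cons p L ih =>
    simp only [List.foldl_cons, List.filterMap_cons]
    rw [show (let count : Int := if p.2 = 0 then 0 else p.2
              let bucket_text := normalize_text p.1 ""
              if count ≤ 0 ∨ bucket_text = "" then st
              else if count > st.2 ∨ (count = st.2 ∧ bucket_text < st.1) then (bucket_text, count)
              else st)
        = (match pvValid p with
           | none => st
           | some q => if pvBefore q st then q else st) from pvStepA p st]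
    cases pvValid p with
    | none => exact ih st
    | some q => exact ih _

lemma pv_head_insertBy (x : String × Int) (acc : List (String × Int)) :
    (PySem.List.insertBy pvBefore x acc).head? =
      some (match acc with
            | [] => x
            | a :: _ => if pvBefore x a then x else a) := by
  cases acc with
  | nil => simp [PySem.List.insertBy]
  | cons a t =>
    by_cases h : pvBefore x a
    · simp [PySem.List.insertBy, h]
    · simp [PySem.List.insertBy, h]

-- invariant: head of the insertion-sort accumulator = A's running best
lemma pv_rel (M : List (String × Int)) (hpos : ∀ x ∈ M, 0 < x.2) :
    ∀ (acc : List (String × Int)) (st : String × Int),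
      ((acc = [] ∧ st = ("", 0)) ∨ acc.head? = some st) →
      ((M.foldl (fun acc x => PySem.List.insertBy pvBefore x acc) acc = [] ∧
        M.foldl (fun st q => if pvBefore q st then q else st) st = ("", 0)) ∨
       (M.foldl (fun acc x => PySem.List.insertBy pvBefore x acc) acc).head? =
        some (M.foldl (fun st q => if pvBefore q st then q else st) st)) := by
  induction M with
  | nil =>
    intro acc st h
    rcases h with ⟨h1, h2⟩ | hhd
    · exact Or.inl ⟨h1, h2⟩
    · exact Or.inr hhd
  | cons x M ih =>
    intro acc st h
    simp only [List.foldl_cons]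
    apply ih (fun y hy => hpos y (List.mem_cons_of_mem _ hy))
    right
    rcases h with ⟨hacc, hst⟩ | hhd
    · subst hacc; subst hst
      have hb : pvBefore x ("", 0) = true :=
        (pvBefore_iff x ("", 0)).mpr (Or.inl (hpos x List.mem_cons_self))
      rw [pv_head_insertBy, if_pos hb]
    · cases acc with
      | nil => simp at hhd
      | cons a t =>
        simp only [List.head?_cons, Option.some.injEq] at hhd
        subst hhd
        rw [pv_head_insertBy]

-- ===== VERDICT (by name: the statement is the Claim_ definition above) =====
theorem find_peak_bucket_spec : Claim_equal_find_peak_bucket := by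
  intro bc _
  unfold Spec_find_peak_bucket find_peak_bucket find_peak_bucket_alt
  rw [pv_filt, pv_scan]
  simp only [List.nil_append]
  have hsorted : PySem.List.sorted2
      (((PySem.Dict.ofList (bc.getD [])).items).filterMap pvValid)
      (fun p => -p.2) (fun p => p.1)
    = (((PySem.Dict.ofList (bc.getD [])).items).filterMap pvValid).foldl
        (fun acc x => PySem.List.insertBy pvBefore x acc) [] := rfl
  rw [hsorted]
  rcases pv_rel (((PySem.Dict.ofList (bc.getD [])).items).filterMap pvValid)
    (fun x hx => by
      rcases List.mem_filterMap.mp hx with ⟨p, _, hp⟩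
      exact pvValid_pos hp)
    [] ("", 0) (Or.inl ⟨rfl, rfl⟩) with ⟨h1, h2⟩ | hhd
  · rw [h2, h1]
  · rcases hh : (((PySem.Dict.ofList (bc.getD [])).items).filterMap pvValid).foldl
        (fun acc x => PySem.List.insertBy pvBefore x acc) [] with _ | ⟨p, t⟩
    · rw [hh] at hhd; simp at hhd
    · rw [hh] at hhd
      simp only [List.head?_cons, Option.some.injEq] at hhd
      rw [hhd]
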